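-- pv_equiv track=rewrite | github.com/DENNISVILL/Predi | ai_system/collectors/twitter_collector.py | _categorize_hashtag
-- ===== SOURCE A (Python) =====
-- from typing import Dict, List, Optional, Any
--
-- def _categorize_hashtag(hashtag: str) -> List[str]:
--     """Categorize hashtag based on keywords"""
--     hashtag_lower = hashtag.lower()
--
--     categories = []
--
--     # Technology keywords
--     if any(word in hashtag_lower for word in ["tech", "ai", "digital", "cyber", "data", "innovation"]):
--         categories.append("technology")
--
--     # Environment keywords
--     if any(word in hashtag_lower for word in ["climate", "green", "sustain", "eco", "environment"]):
--         categories.append("environment")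
--
--     # Business keywords
--     if any(word in hashtag_lower for word in ["business", "startup", "work", "finance", "economy"]):
--         categories.append("business")
--
--     # Health keywords
--     if any(word in hashtag_lower for word in ["health", "wellness", "medical", "fitness"]):
--         categories.append("health")
--
--     return categories if categories else ["general"]
-- ===== SOURCE B (Python) =====
-- from typing import Dict, List, Optional, Any
--
-- # Inverted index: keyword -> category.  B scans the hashtag's character
-- # windows once and hash-looks each one up, instead of scanning the hashtag
-- # once per keyword.
-- KEYWORD_TO_CATEGORY = {
--     "tech": "technology", "ai": "technology", "digital": "technology",
--     "cyber": "technology", "data": "technology", "innovation": "technology",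
--     "climate": "environment", "green": "environment", "sustain": "environment",
--     "eco": "environment", "environment": "environment",
--     "business": "business", "startup": "business", "work": "business",
--     "finance": "business", "economy": "business",
--     "health": "health", "wellness": "health", "medical": "health",
--     "fitness": "health",
-- }
--
-- _MAX_KEYWORD_LEN = 11  # len("environment")
--
-- _ORDER = ["technology", "environment", "business", "health"]
--
-- def _categorize_hashtag(hashtag: str) -> List[str]:
--     s = hashtag.lower()
--     found = set()
--     for i in range(len(s)):
--         for length in range(1, _MAX_KEYWORD_LEN + 1):
--             category = KEYWORD_TO_CATEGORY.get(s[i:i + length])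
--             if category is not None:
--                 found.add(category)
--     matched = [c for c in _ORDER if c in found]
--     return matched if matched else ["general"]
-- ===== Notes on version B (the rewrite author's own statement) =====
-- stated objective: alternative
-- what changed: B inverts the search: instead of testing each keyword for containment per category, it slides over the hashtag once, hash-looking every window of up to the maximal keyword length in an inverted keyword-to-category index collected into a set, then emits the canonical category order (or the default).
import Mathlib
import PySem

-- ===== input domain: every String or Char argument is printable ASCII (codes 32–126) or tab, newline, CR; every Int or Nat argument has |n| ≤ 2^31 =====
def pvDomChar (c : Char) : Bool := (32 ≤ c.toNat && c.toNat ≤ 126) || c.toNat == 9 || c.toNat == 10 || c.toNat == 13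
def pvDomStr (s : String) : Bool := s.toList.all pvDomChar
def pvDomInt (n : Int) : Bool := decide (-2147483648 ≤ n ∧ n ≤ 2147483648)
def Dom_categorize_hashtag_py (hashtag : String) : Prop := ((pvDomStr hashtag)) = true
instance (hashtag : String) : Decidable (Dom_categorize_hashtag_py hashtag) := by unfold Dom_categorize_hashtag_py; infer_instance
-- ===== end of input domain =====

-- B inverts the search: one sliding pass over the hashtag's windows looked up in a keyword→category index collected into a set, instead of per-keyword containment tests (alternative; same result).
-- ===== PORT A =====
def categorize_hashtag_py (hashtag : String) : List String :=
  let hashtag_lower := PySem.Str.lower hashtag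
  let categories : List String := []
  let categories := if ["tech", "ai", "digital", "cyber", "data", "innovation"].any
      (fun w => PySem.Str.isIn w hashtag_lower) then categories ++ ["technology"] else categories
  let categories := if ["climate", "green", "sustain", "eco", "environment"].any
      (fun w => PySem.Str.isIn w hashtag_lower) then categories ++ ["environment"] else categories
  let categories := if ["business", "startup", "work", "finance", "economy"].any
      (fun w => PySem.Str.isIn w hashtag_lower) then categories ++ ["business"] else categories
  let categories := if ["health", "wellness", "medical", "fitness"].any
      (fun w => PySem.Str.isIn w hashtag_lower) then categories ++ ["health"] else categories
  if categories = [] then ["general"] else categories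

-- ===== PORT B =====
-- KEYWORD_TO_CATEGORY in Source B (a dict literal with distinct keys)
def pvKWEntries : List (String × String) :=
  [("tech", "technology"), ("ai", "technology"), ("digital", "technology"),
   ("cyber", "technology"), ("data", "technology"), ("innovation", "technology"),
   ("climate", "environment"), ("green", "environment"), ("sustain", "environment"),
   ("eco", "environment"), ("environment", "environment"),
   ("business", "business"), ("startup", "business"), ("work", "business"),
   ("finance", "business"), ("economy", "business"),
   ("health", "health"), ("wellness", "health"), ("medical", "health"),
   ("fitness", "health")]

def pvKW : PySem.Dict String String := PySem.Dict.mk pvKWEntries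

def pvMaxKeywordLen : Int := 11  -- _MAX_KEYWORD_LEN

def pvORDER : List String := ["technology", "environment", "business", "health"]

def categorize_hashtag_py_alt (hashtag : String) : List String :=
  let s := PySem.Str.lower hashtag
  let found : PySem.Set String :=
    (PySem.List.pyRange 0 (PySem.Str.len s : Int) 1).foldl (fun found i =>
      (PySem.List.pyRange 1 (pvMaxKeywordLen + 1) 1).foldl (fun found length =>
        match pvKW.get? (PySem.Str.slice s (some i) (some (i + length))) with
        | some category => PySem.Set.add found category
        | none => found) found) PySem.Set.empty
  let matched := pvORDER.filter (fun c => PySem.Set.contains found c)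
  if matched.isEmpty then ["general"] else matched

-- ===== PRECONDITION & SPEC =====
def Spec_categorize_hashtag_py (hashtag : String) (out : List String) : Prop := out = categorize_hashtag_py_alt hashtag
instance (hashtag : String) (out : List String) : Decidable (Spec_categorize_hashtag_py hashtag out) := by unfold Spec_categorize_hashtag_py; infer_instance

-- ===== CLAIM (what is proved, stated in full; the proofs are below) =====
def Claim_equal_categorize_hashtag_py : Prop := ∀ (hashtag : String), Dom_categorize_hashtag_py hashtag → Spec_categorize_hashtag_py hashtag (categorize_hashtag_py hashtag)

-- ===== LEMMAS AND PROOFS =====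

-- Generic: membership after a foldl whose step adds exactly the elements satisfying Q
theorem pv_mem_foldl_of_step {β : Type} {step : PySem.Set String → β → PySem.Set String}
    {Q : β → String → Prop}
    (h : ∀ acc b y, y ∈ step acc b ↔ y ∈ acc ∨ Q b y)
    (l : List β) (s0 : PySem.Set String) (y : String) :
    y ∈ l.foldl step s0 ↔ y ∈ s0 ∨ ∃ b ∈ l, Q b y := by
  induction l generalizing s0 with
  | nil => simp
  | cons hd tl ih =>
    simp only [List.foldl_cons, ih, h, List.mem_cons]
    constructor
    · rintro ((hy | hq) | ⟨b, hb, hq⟩)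
      · exact Or.inl hy
      · exact Or.inr ⟨hd, Or.inl rfl, hq⟩
      · exact Or.inr ⟨b, Or.inr hb, hq⟩
    · rintro (hy | ⟨b, (rfl | hb), hq⟩)
      · exact Or.inl (Or.inl hy)
      · exact Or.inl (Or.inr hq)
      · exact Or.inr ⟨b, hb, hq⟩

-- The inner/outer loop bodies add exactly the looked-up categories
theorem pv_mem_matchOpt_step (f : Int → Option String) (acc : PySem.Set String) (b : Int) (y : String) :
    y ∈ (match f b with
         | some category => PySem.Set.add acc category
         | none => acc) ↔ y ∈ acc ∨ f b = some y := by
  cases hf : f b with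
  | none => simp
  | some c => simp [PySem.Set.mem_add, eq_comm]

-- lookup in the literal dict = membership in the entry list (keys are distinct)
theorem pv_get?_mk_eq_some_iff (l : List (String × String)) (hl : (l.map Prod.fst).Nodup)
    (k v : String) : (PySem.Dict.mk l).get? k = some v ↔ (k, v) ∈ l := by
  induction l with
  | nil => simp [PySem.Dict.get?]
  | cons hd tl ih =>
    rcases hd with ⟨a, b⟩
    simp only [List.map_cons, List.nodup_cons] at hl
    rw [PySem.Dict.get?_mk_cons]
    by_cases hak : a = k
    · subst hak
      simp only [beq_self_eq_true, if_pos, List.mem_cons, Option.some.injEq]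
      constructor
      · rintro rfl; exact Or.inl rfl
      · rintro (h | h)
        · exact (Prod.mk.injEq _ _ _ _ ▸ h).2.symm ▸ rfl
        · exact absurd (List.mem_map_of_mem (f := Prod.fst) h) hl.1
    · rw [if_neg (by simp [hak])]
      rw [ih hl.2]
      simp only [List.mem_cons, Prod.mk.injEq]
      constructor
      · exact Or.inr
      · rintro (⟨rfl, rfl⟩ | h)
        · exact absurd rfl hak
        · exact h

theorem pv_kw_nodup : (pvKWEntries.map Prod.fst).Nodup := by decide

-- a window of s equals w  ↔  w occurs in s   (for keyword lengths 1 ≤ |w| ≤ 11)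
theorem pv_window_iff_isIn (s w : String) (h1 : 1 ≤ w.toList.length) (h2 : w.toList.length ≤ 11) :
    (∃ i ∈ PySem.List.pyRange 0 (PySem.Str.len s : Int) 1,
      ∃ L ∈ PySem.List.pyRange 1 12 1,
        PySem.Str.slice s (some i) (some (i + L)) = w) ↔ PySem.Str.isIn w s = true := by
  rw [show PySem.Str.isIn w s = PySem.Chars.isIn w.toList s.toList from rfl,
      ← PySem.Chars.exists_prefix_drop_iff_isIn]
  constructor
  · rintro ⟨i, hi, L, hL, hsl⟩
    rw [PySem.List.mem_pyRange_one] at hi hL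
    refine ⟨i.toNat, ?_⟩
    have : (PySem.Str.slice s (some i) (some (i + L))).toList = w.toList := by rw [hsl]
    rw [PySem.Str.toList_slice, PySem.Chars.slice_eq_listSlice] at this
    have hi' : i = ((i.toNat : Nat) : Int) := by omega
    have hL' : L = ((L.toNat : Nat) : Int) := by omega
    rw [hi', hL', PySem.List.slice_natCast_add] at this
    rw [← this]
    exact List.take_prefix _ _
  · rintro ⟨j, hj⟩
    have hlen := hj.length_le
    simp only [List.length_drop] at hlen
    have hjlt : j < s.toList.length := by omega
    refine ⟨(j : Int), ?_, (w.toList.length : Int), ?_, ?_⟩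
    · rw [PySem.List.mem_pyRange_one]
      constructor
      · exact Int.natCast_nonneg j
      · have : PySem.Str.len s = s.toList.length := rfl
        omega
    · rw [PySem.List.mem_pyRange_one]; omega
    · have hw : (s.toList.drop j).take w.toList.length = w.toList := by
        rw [List.prefix_iff_eq_take] at hj; exact hj.symm
      have : (PySem.Str.slice s (some (j : Int)) (some ((j : Int) + (w.toList.length : Int)))).toList = w.toList := by
        rw [PySem.Str.toList_slice, PySem.Chars.slice_eq_listSlice, PySem.List.slice_natCast_add, hw]
      exact String.toList_inj.mp (by rw [this])

-- membership in B's 'found' set = some keyword of that category occurs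
theorem pv_mem_found (s c : String) :
    c ∈ ((PySem.List.pyRange 0 (PySem.Str.len s : Int) 1).foldl (fun found i =>
      (PySem.List.pyRange 1 (pvMaxKeywordLen + 1) 1).foldl (fun found length =>
        match pvKW.get? (PySem.Str.slice s (some i) (some (i + length))) with
        | some category => PySem.Set.add found category
        | none => found) found) PySem.Set.empty)
    ↔ ∃ p ∈ pvKWEntries, p.2 = c ∧ PySem.Str.isIn p.1 s = true := by
  have hstep : ∀ (acc : PySem.Set String) (i : Int) (y : String),
      y ∈ (PySem.List.pyRange 1 (pvMaxKeywordLen + 1) 1).foldl (fun found length =>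
        match pvKW.get? (PySem.Str.slice s (some i) (some (i + length))) with
        | some category => PySem.Set.add found category
        | none => found) acc
      ↔ y ∈ acc ∨ ∃ L ∈ PySem.List.pyRange 1 (pvMaxKeywordLen + 1) 1,
          pvKW.get? (PySem.Str.slice s (some i) (some (i + L))) = some y := by
    intro acc i y
    exact pv_mem_foldl_of_step (fun acc b y => pv_mem_matchOpt_step
      (fun L => pvKW.get? (PySem.Str.slice s (some i) (some (i + L)))) acc b y) _ acc y
  rw [pv_mem_foldl_of_step hstep]
  simp only [PySem.Set.empty, List.not_mem_nil, false_or]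
  constructor
  · rintro ⟨i, hi, L, hL, hget⟩
    rw [show pvKW = PySem.Dict.mk pvKWEntries from rfl,
        pv_get?_mk_eq_some_iff _ pv_kw_nodup] at hget
    refine ⟨(PySem.Str.slice s (some i) (some (i + L)), c), hget, rfl, ?_⟩
    have h1 : 1 ≤ (PySem.Str.slice s (some i) (some (i + L))).toList.length ∧
              (PySem.Str.slice s (some i) (some (i + L))).toList.length ≤ 11 := by
      revert hget
      generalize PySem.Str.slice s (some i) (some (i + L)) = key
      intro hget
      fin_cases hget <;> simp_all
    rw [← pv_window_iff_isIn s _ h1.1 h1.2]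
    exact ⟨i, hi, L, by simpa [pvMaxKeywordLen] using hL, rfl⟩
  · rintro ⟨⟨k, c'⟩, hmem, rfl, hin⟩
    have hk : 1 ≤ k.toList.length ∧ k.toList.length ≤ 11 := by
      fin_cases hmem <;> refine ⟨by decide, by decide⟩
    obtain ⟨i, hi, L, hL, hsl⟩ := (pv_window_iff_isIn s k hk.1 hk.2).mpr hin
    refine ⟨i, hi, L, by simpa [pvMaxKeywordLen] using hL, ?_⟩
    rw [show pvKW = PySem.Dict.mk pvKWEntries from rfl,
        pv_get?_mk_eq_some_iff _ pv_kw_nodup, hsl]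
    exact hmem

set_option maxHeartbeats 2000000 in
-- ===== VERDICT (by name: the statement is the Claim_ definition above) =====
theorem categorize_hashtag_py_spec : Claim_equal_categorize_hashtag_py := by
  intro hashtag _
  unfold Spec_categorize_hashtag_py categorize_hashtag_py categorize_hashtag_py_alt
  set s := PySem.Str.lower hashtag with hs
  have hcontains : ∀ c ∈ pvORDER, ∀ kws : List String,
      (∀ p ∈ pvKWEntries, p.2 = c → p.1 ∈ kws) →
      (∀ k ∈ kws, (k, c) ∈ pvKWEntries) →
      (PySem.Set.contains ((PySem.List.pyRange 0 (PySem.Str.len s : Int) 1).foldl (fun found i =>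
        (PySem.List.pyRange 1 (pvMaxKeywordLen + 1) 1).foldl (fun found length =>
          match pvKW.get? (PySem.Str.slice s (some i) (some (i + length))) with
          | some category => PySem.Set.add found category
          | none => found) found) PySem.Set.empty) c) =
      kws.any (fun w => PySem.Str.isIn w s) := by
    intro c _ kws hfwd hbwd
    rw [Bool.eq_iff_iff, PySem.Set.contains_iff, pv_mem_found, List.any_eq_true]
    constructor
    · rintro ⟨p, hp, hc, hin⟩; exact ⟨p.1, hfwd p hp hc, hin⟩
    · rintro ⟨k, hk, hin⟩; exact ⟨(k, c), hbwd k hk, rfl, hin⟩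
  have h1 := hcontains "technology" (by decide) ["tech", "ai", "digital", "cyber", "data", "innovation"] (by decide) (by decide)
  have h2 := hcontains "environment" (by decide) ["climate", "green", "sustain", "eco", "environment"] (by decide) (by decide)
  have h3 := hcontains "business" (by decide) ["business", "startup", "work", "finance", "economy"] (by decide) (by decide)
  have h4 := hcontains "health" (by decide) ["health", "wellness", "medical", "fitness"] (by decide) (by decide)
  simp only [pvORDER, List.filter, h1, h2, h3, h4]
  generalize (["tech", "ai", "digital", "cyber", "data", "innovation"].any
      fun w => PySem.Str.isIn w s) = b1 at *
  generalize (["climate", "green", "sustain", "eco", "environment"].any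
      fun w => PySem.Str.isIn w s) = b2 at *
  generalize (["business", "startup", "work", "finance", "economy"].any
      fun w => PySem.Str.isIn w s) = b3 at *
  generalize (["health", "wellness", "medical", "fitness"].any
      fun w => PySem.Str.isIn w s) = b4 at *
  cases b1 <;> cases b2 <;> cases b3 <;> cases b4 <;> rfl
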